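-- pv_equiv track=rewrite | github.com/PierreVieira/URI | Python/Strings/1237 - Comparação de Substring.py | tem_substring_com_o_tamanho
-- ===== SOURCE A (Python) =====
-- def tem_substring_com_o_tamanho(tamanho_pesquisa, s1, s2, t2):
--     string_pesquisa = ''
--     for i in range(t2):
--         j = i
--         for k in range(tamanho_pesquisa):
--             try:
--                 string_pesquisa += s2[j]
--             except IndexError:
--                 return False
--             else:
--                 j += 1
--         if len(string_pesquisa) != tamanho_pesquisa:
--             return False
--         elif string_pesquisa in s1:
--             return True
--         string_pesquisa = ''
--     return False
-- ===== SOURCE B (Python) =====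
-- def tem_substring_com_o_tamanho(tamanho_pesquisa, s1, s2, t2):
--     if tamanho_pesquisa < 0:
--         return False
--     n2 = len(s2)
--     subs2 = set()
--     for i in range(t2):
--         subs2.add(s2[i:i + tamanho_pesquisa])
--         if i + tamanho_pesquisa > n2:
--             break
--     subs1 = {s1[i:i + tamanho_pesquisa] for i in range(len(s1) - tamanho_pesquisa + 1)}
--     return bool(subs2 & subs1)
-- ===== Notes on version B (the rewrite author's own statement) =====
-- stated objective: alternative
-- what changed: A scans s1 afresh for each candidate substring of s2 (built char-by-char under try/except); B builds the set of all length-L substrings of s1 once and the set of candidate slices of s2 (stopping at the first out-of-bounds start) and returns whether the two sets intersect.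
import Mathlib
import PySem

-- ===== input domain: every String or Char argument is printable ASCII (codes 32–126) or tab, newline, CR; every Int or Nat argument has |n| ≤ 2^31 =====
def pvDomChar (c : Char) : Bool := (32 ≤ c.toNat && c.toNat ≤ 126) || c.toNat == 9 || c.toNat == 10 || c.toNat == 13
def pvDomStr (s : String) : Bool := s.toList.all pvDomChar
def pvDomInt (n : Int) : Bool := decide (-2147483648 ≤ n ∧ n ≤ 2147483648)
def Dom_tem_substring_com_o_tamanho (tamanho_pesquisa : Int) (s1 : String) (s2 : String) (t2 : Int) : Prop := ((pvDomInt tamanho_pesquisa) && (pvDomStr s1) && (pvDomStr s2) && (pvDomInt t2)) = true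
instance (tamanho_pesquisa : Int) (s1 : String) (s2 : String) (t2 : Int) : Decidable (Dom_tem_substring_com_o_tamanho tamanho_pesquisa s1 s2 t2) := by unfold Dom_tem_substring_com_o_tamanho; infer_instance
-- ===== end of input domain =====

-- B replaces A's per-candidate scan of s1 (with a char-by-char try/except build) by two
-- substring-set builds and one set intersection, returning whether they intersect.


-- ===== PORT A =====
-- inner 'for k in range(tamanho_pesquisa)' loop: appends s2[j] to the accumulator, j += 1;
-- returns none where Python's IndexError makes A 'return False' (counter form of range: the
-- loop stops as soon as k reaches tamanho_pesquisa or s2[j] raises, like Python's lazy range)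
def pvAInner (s2 : List Char) (k L : Int) (acc : List Char) (j : Int) :
    Option (List Char × Int) :=
  if k < L then
    match PySem.List.pyGet? s2 j with
    | none => none
    | some c => pvAInner s2 (k + 1) L (acc ++ [c]) (j + 1)
  else some (acc, j)
termination_by (L - k).toNat
decreasing_by omega

-- outer 'for i in range(t2)' loop (counter form) with its three early returns
def pvAOuter (L : Int) (s1 s2 : List Char) (i t2 : Int) : Bool :=
  if i < t2 then
    match pvAInner s2 0 L [] i with
    | none => false
    | some (sp, _) =>
      if ((sp.length : Int) ≠ L) then false
      else if PySem.Chars.isIn sp s1 then true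
      else pvAOuter L s1 s2 (i + 1) t2
  else false
termination_by (t2 - i).toNat
decreasing_by omega

def tem_substring_com_o_tamanho (tamanho_pesquisa : Int) (s1 : String) (s2 : String) (t2 : Int) : Bool :=
  pvAOuter tamanho_pesquisa s1.toList s2.toList 0 t2

-- ===== PORT B =====
-- 'for i in range(t2): subs2.add(s2[i:i+L]); if i+L > len(s2): break'  (counter form)
def pvBCollect (L : Int) (s2 : List Char) (i t2 : Int) (acc : PySem.Set (List Char)) :
    PySem.Set (List Char) :=
  if i < t2 then
    let acc' := PySem.Set.add acc (PySem.List.slice s2 (some i) (some (i + L)))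
    if (s2.length : Int) < i + L then acc' else pvBCollect L s2 (i + 1) t2 acc'
  else acc
termination_by (t2 - i).toNat
decreasing_by omega

-- list-based twins (proof helpers)

def tem_substring_com_o_tamanho_alt (tamanho_pesquisa : Int) (s1 : String) (s2 : String) (t2 : Int) : Bool :=
  if tamanho_pesquisa < 0 then false
  else
    let subs2 := pvBCollect tamanho_pesquisa s2.toList 0 t2 PySem.Set.empty
    let subs1 := PySem.Set.ofList
      ((PySem.List.pyRange 0 ((s1.toList.length : Int) - tamanho_pesquisa + 1) 1).map
        (fun i => PySem.List.slice s1.toList (some i) (some (i + tamanho_pesquisa))))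
    !(PySem.Set.inter subs2 subs1).isEmpty

-- ===== PRECONDITION & SPEC =====
def Spec_tem_substring_com_o_tamanho (tamanho_pesquisa : Int) (s1 : String) (s2 : String) (t2 : Int) (out : Bool) : Prop := out = tem_substring_com_o_tamanho_alt tamanho_pesquisa s1 s2 t2
instance (tamanho_pesquisa : Int) (s1 : String) (s2 : String) (t2 : Int) (out : Bool) : Decidable (Spec_tem_substring_com_o_tamanho tamanho_pesquisa s1 s2 t2 out) := by unfold Spec_tem_substring_com_o_tamanho; infer_instance

-- ===== CLAIM (what is proved, stated in full; the proofs are below) =====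
def Claim_equal_tem_substring_com_o_tamanho : Prop := ∀ (tamanho_pesquisa : Int) (s1 : String) (s2 : String) (t2 : Int), Dom_tem_substring_com_o_tamanho tamanho_pesquisa s1 s2 t2 → Spec_tem_substring_com_o_tamanho tamanho_pesquisa s1 s2 t2 (tem_substring_com_o_tamanho tamanho_pesquisa s1 s2 t2)

-- ===== LEMMAS AND PROOFS =====


-- list-based twins of the three loops, plus bridges (range materialised, for the proofs)
def pvAInnerL (s2 : List Char) (ks : List Int) (acc : List Char) (j : Int) :
    Option (List Char × Int) :=
  match ks with
  | [] => some (acc, j)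
  | _ :: ks' =>
    match PySem.List.pyGet? s2 j with
    | none => none
    | some c => pvAInnerL s2 ks' (acc ++ [c]) (j + 1)

def pvAOuterL (L : Int) (s1 s2 : List Char) (is : List Int) : Bool :=
  match is with
  | [] => false
  | i :: is' =>
    match pvAInnerL s2 (PySem.List.pyRange 0 L 1) [] i with
    | none => false
    | some (sp, _) =>
      if ((sp.length : Int) ≠ L) then false
      else if PySem.Chars.isIn sp s1 then true
      else pvAOuterL L s1 s2 is'

def pvBCollectL (L : Int) (s2 : List Char) (is : List Int) (acc : PySem.Set (List Char)) :
    PySem.Set (List Char) :=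
  match is with
  | [] => acc
  | i :: is' =>
    let acc' := PySem.Set.add acc (PySem.List.slice s2 (some i) (some (i + L)))
    if (s2.length : Int) < i + L then acc' else pvBCollectL L s2 is' acc'

theorem pvAInner_bridge (s2 : List Char) (L : Int) :
    ∀ (n : Nat) (k : Int), (L - k).toNat = n → ∀ acc j,
      pvAInner s2 k L acc j = pvAInnerL s2 (PySem.List.pyRange k L 1) acc j := by
  intro n
  induction n with
  | zero =>
    intro k hk acc j
    rw [pvAInner, PySem.List.pyRange_one_eq_nil (by omega), if_neg (by omega)]
    rfl
  | succ n ih =>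
    intro k hk acc j
    rw [pvAInner, PySem.List.pyRange_one_cons (by omega), if_pos (by omega)]
    simp only [pvAInnerL]
    cases PySem.List.pyGet? s2 j with
    | none => rfl
    | some c => exact ih (k + 1) (by omega) _ _

theorem pvAOuter_bridge (L : Int) (s1 s2 : List Char) (t2 : Int) :
    ∀ (n : Nat) (i : Int), (t2 - i).toNat = n →
      pvAOuter L s1 s2 i t2 = pvAOuterL L s1 s2 (PySem.List.pyRange i t2 1) := by
  intro n
  induction n with
  | zero =>
    intro i hi
    rw [pvAOuter, PySem.List.pyRange_one_eq_nil (by omega), if_neg (by omega)]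
    rfl
  | succ n ih =>
    intro i hi
    rw [pvAOuter, PySem.List.pyRange_one_cons (by omega), if_pos (by omega)]
    simp only [pvAOuterL, pvAInner_bridge s2 L L.toNat 0 (by omega)]
    cases pvAInnerL s2 (PySem.List.pyRange 0 L 1) [] i with
    | none => rfl
    | some r =>
      cases r with
      | mk sp j =>
        simp only []
        split
        · rfl
        · split
          · rfl
          · exact ih (i + 1) (by omega)

theorem pvBCollect_bridge (L : Int) (s2 : List Char) (t2 : Int) :
    ∀ (n : Nat) (i : Int), (t2 - i).toNat = n → ∀ acc,
      pvBCollect L s2 i t2 acc = pvBCollectL L s2 (PySem.List.pyRange i t2 1) acc := by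
  intro n
  induction n with
  | zero =>
    intro i hi acc
    rw [pvBCollect, PySem.List.pyRange_one_eq_nil (by omega), if_neg (by omega)]
    rfl
  | succ n ih =>
    intro i hi acc
    rw [pvBCollect, PySem.List.pyRange_one_cons (by omega), if_pos (by omega)]
    simp only [pvBCollectL]
    split
    · rfl
    · exact ih (i + 1) (by omega) _


-- A's inner loop succeeds exactly when j + len(ks) chars are available in s2
theorem pvAInner_ok (s2 : List Char) (ks : List Int) (acc : List Char) (j : Nat)
    (h : j + ks.length ≤ s2.length) :
    pvAInnerL s2 ks acc (j : Int) =
      some (acc ++ (s2.drop j).take ks.length, (j : Int) + ks.length) := by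
  induction ks generalizing acc j with
  | nil => simp [pvAInnerL]
  | cons k ks' ih =>
    have hj : j < s2.length := by simp at h; omega
    have hd : s2.drop j = s2[j] :: s2.drop (j + 1) := List.drop_eq_getElem_cons hj
    simp only [pvAInnerL, PySem.List.pyGet?_natCast, List.getElem?_eq_getElem hj]
    have : (j : Int) + 1 = ((j + 1 : Nat) : Int) := by push_cast; ring
    rw [this, ih (acc ++ [s2[j]]) (j + 1) (by simp at h ⊢; omega)]
    rw [hd]
    simp only [List.take_succ_cons, List.length_cons, List.append_assoc, List.singleton_append]
    congr 2
    push_cast; ring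

-- and raises (returns none) when they are not
theorem pvAInner_fail (s2 : List Char) (ks : List Int) (acc : List Char) (j : Nat)
    (hne : ks ≠ []) (h : s2.length < j + ks.length) :
    pvAInnerL s2 ks acc (j : Int) = none := by
  induction ks generalizing acc j with
  | nil => simp at hne
  | cons k ks' ih =>
    by_cases hj : j < s2.length
    · simp only [pvAInnerL, PySem.List.pyGet?_natCast, List.getElem?_eq_getElem hj]
      have hne' : ks' ≠ [] := by
        intro he; subst he; simp at h; omega
      have : (j : Int) + 1 = ((j + 1 : Nat) : Int) := by push_cast; ring
      rw [this, ih (acc ++ [s2[j]]) (j + 1) hne' (by simp at h ⊢; omega)]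
    · simp only [pvAInnerL, PySem.List.pyGet?_natCast]
      rw [List.getElem?_eq_none (by omega)]

-- A is identically false when the requested length is negative (its length check always fails)
theorem pvAOuter_neg (L : Int) (hL : L < 0) (s1 s2 : List Char) (is : List Int) :
    pvAOuterL L s1 s2 is = false := by
  cases is with
  | nil => rfl
  | cons i is' =>
    have hr : PySem.List.pyRange 0 L 1 = [] := PySem.List.pyRange_one_eq_nil (by omega)
    simp only [pvAOuterL, hr, pvAInnerL]
    simp
    omega

-- the candidate test both programs decide for a start index i
def pvP (L : Int) (s1 s2 : List Char) (i : Int) : Bool :=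
  decide (i + L ≤ (s2.length : Int)) && PySem.Chars.isIn ((s2.drop i.toNat).take L.toNat) s1

-- A's outer loop on a sorted list of nonnegative start indices is an 'any' of pvP
theorem pvAOuter_char (L : Int) (hL : 1 ≤ L) (s1 s2 : List Char) (is : List Int)
    (hnn : ∀ i ∈ is, 0 ≤ i) (hs : is.Pairwise (· ≤ ·)) :
    pvAOuterL L s1 s2 is = is.any (pvP L s1 s2) := by
  induction is with
  | nil => rfl
  | cons i is' ih =>
    have hi0 : 0 ≤ i := hnn i (by simp)
    have hlen : (PySem.List.pyRange 0 L 1).length = L.toNat := by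
      rw [PySem.List.length_pyRange_one]; omega
    have hicast : ((i.toNat : Nat) : Int) = i := by omega
    by_cases hok : i + L ≤ (s2.length : Int)
    · have hok' : i.toNat + (PySem.List.pyRange 0 L 1).length ≤ s2.length := by
        rw [hlen]; omega
      have hinner : pvAInnerL s2 (PySem.List.pyRange 0 L 1) [] i =
          some ([] ++ (s2.drop i.toNat).take (PySem.List.pyRange 0 L 1).length,
            (i.toNat : Int) + ((PySem.List.pyRange 0 L 1).length : Int)) := by
        rw [← hicast]; exact pvAInner_ok s2 _ [] i.toNat hok'
      rw [hlen] at hinner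
      simp only [pvAOuterL, hinner]
      have hlsp : (((((s2.drop i.toNat).take L.toNat)).length : Int) = L) := by
        simp; omega
      simp only [List.nil_append, hlsp]
      simp only [if_neg (by omega : ¬ (L ≠ L))]
      by_cases hin : PySem.Chars.isIn ((s2.drop i.toNat).take L.toNat) s1 = true
      · have hp : pvP L s1 s2 i = true := by simp only [pvP, hin]; simp [hok]
        simp [List.any_cons, hp, hin]
      · simp only [Bool.not_eq_true] at hin
        simp only [hin, Bool.false_eq_true, if_false]
        rw [ih (fun x hx => hnn x (by simp [hx])) (hs.sublist (List.sublist_cons_self i is'))]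
        have hpf : pvP L s1 s2 i = false := by simp [pvP, hin]
        simp [List.any_cons, hpf]
    · have hfail : pvAInnerL s2 (PySem.List.pyRange 0 L 1) [] i = none := by
        rw [← hicast]
        apply pvAInner_fail s2 _ [] i.toNat
        · intro he; rw [he] at hlen; simp at hlen; omega
        · rw [hlen]; omega
      simp only [pvAOuterL, hfail]
      have h1 : pvP L s1 s2 i = false := by simp [pvP]; intro h; omega
      have h2 : is'.any (pvP L s1 s2) = false := by
        rw [List.any_eq_false]
        intro x hx
        have : i ≤ x := (List.pairwise_cons.mp hs).1 x hx
        simp [pvP]; intro h; omega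
      simp [List.any_cons, h1, h2]

-- everything already in the accumulator survives pvBCollectL
theorem pvBCollect_mono (L : Int) (s2 : List Char) (is : List Int)
    (acc : PySem.Set (List Char)) (x : List Char) (hx : x ∈ acc) :
    x ∈ pvBCollectL L s2 is acc := by
  induction is generalizing acc with
  | nil => exact hx
  | cons i is' ih =>
    simp only [pvBCollectL]
    split
    · exact (PySem.Set.mem_add _ _ _).mpr (Or.inl hx)
    · exact ih _ ((PySem.Set.mem_add _ _ _).mpr (Or.inl hx))

-- every member of pvBCollectL's result is from acc or is a slice at some i ∈ is
theorem pvBCollect_src (L : Int) (s2 : List Char) (is : List Int)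
    (acc : PySem.Set (List Char)) (x : List Char)
    (hx : x ∈ pvBCollectL L s2 is acc) :
    x ∈ acc ∨ ∃ i ∈ is, x = PySem.List.slice s2 (some i) (some (i + L)) := by
  induction is generalizing acc with
  | nil => exact Or.inl hx
  | cons i is' ih =>
    simp only [pvBCollectL] at hx
    split at hx
    · rcases (PySem.Set.mem_add _ _ _).mp hx with h | h
      · exact Or.inl h
      · exact Or.inr ⟨i, by simp, h⟩
    · rcases ih _ hx with h | ⟨i', hi', he⟩
      · rcases (PySem.Set.mem_add _ _ _).mp h with h | h
        · exact Or.inl h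
        · exact Or.inr ⟨i, by simp, h⟩
      · exact Or.inr ⟨i', by simp [hi'], he⟩

-- on a sorted index list every in-bounds slice is collected (the break comes strictly later)
theorem pvBCollect_mem (L : Int) (s2 : List Char) (is : List Int)
    (acc : PySem.Set (List Char)) (hs : is.Pairwise (· ≤ ·)) (i : Int) (hi : i ∈ is)
    (hok : i + L ≤ (s2.length : Int)) :
    PySem.List.slice s2 (some i) (some (i + L)) ∈ pvBCollectL L s2 is acc := by
  induction is generalizing acc with
  | nil => simp at hi
  | cons j is' ih =>
    simp only [pvBCollectL]
    rcases List.mem_cons.mp hi with rfl | hi'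
    · rw [if_neg (by omega)]
      exact pvBCollect_mono _ _ _ _ _ ((PySem.Set.mem_add _ _ _).mpr (Or.inr rfl))
    · have hji : j ≤ i := (List.pairwise_cons.mp hs).1 i hi'
      rw [if_neg (by omega)]
      exact ih _ (hs.sublist (List.sublist_cons_self j is')) hi'

-- s2[i:i+L] for 0 ≤ i, 0 ≤ L is a drop/take
theorem pvSlice_eq (cs : List Char) (L i : Int) (hi : 0 ≤ i) (hL : 0 ≤ L) :
    PySem.List.slice cs (some i) (some (i + L)) = (cs.drop i.toNat).take L.toNat := by
  rw [PySem.List.slice_toNat cs hi (by omega)]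
  congr 1
  omega

theorem pvSlice_len (cs : List Char) (a b : Nat) :
    ((cs.drop a).take b).length = min b (cs.length - a) := by
  simp

-- membership in B's table of length-L substrings of s1

-- membership in B's table of length-L substrings of s1
theorem pvMemSubs1 (cs1 : List Char) (L : Int) (hL : 0 ≤ L) (x : List Char) :
    (x ∈ PySem.Set.ofList ((PySem.List.pyRange 0 ((cs1.length : Int) - L + 1) 1).map
        (fun i => PySem.List.slice cs1 (some i) (some (i + L)))))
      ↔ ∃ j : Nat, (j : Int) + L ≤ (cs1.length : Int) ∧ x = (cs1.drop j).take L.toNat := by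
  rw [PySem.Set.mem_ofList]
  simp only [List.mem_map, PySem.List.mem_pyRange_one]
  constructor
  · rintro ⟨i, ⟨hi0, hilt⟩, rfl⟩
    exact ⟨i.toNat, by omega, by rw [pvSlice_eq cs1 L i hi0 hL]⟩
  · rintro ⟨j, hj, rfl⟩
    exact ⟨(j : Int), ⟨by omega, by omega⟩, by rw [pvSlice_eq cs1 L j (by omega) hL]; simp⟩

-- bool(set) is true at any inhabited list
theorem pvBangIsEmpty {α : Type} (l : List α) (x : α) (hx : x ∈ l) : (!l.isEmpty) = true := by
  simp only [Bool.not_eq_true', List.isEmpty_eq_false_iff, ne_eq]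
  exact List.ne_nil_of_mem hx

-- B's set intersection decides the same 'any' for L ≥ 1
theorem pvB_core (L : Int) (hL : 1 ≤ L) (cs1 cs2 : List Char) (t2 : Int) :
    (PySem.List.pyRange 0 t2 1).any (pvP L cs1 cs2) =
      !(PySem.Set.inter (pvBCollectL L cs2 (PySem.List.pyRange 0 t2 1) PySem.Set.empty)
        (PySem.Set.ofList ((PySem.List.pyRange 0 ((cs1.length : Int) - L + 1) 1).map
          (fun i => PySem.List.slice cs1 (some i) (some (i + L)))))).isEmpty := by
  cases hany : (PySem.List.pyRange 0 t2 1).any (pvP L cs1 cs2) with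
  | true =>
    obtain ⟨i, hi, hp⟩ := List.any_eq_true.mp hany
    obtain ⟨hi0, hilt⟩ := (PySem.List.mem_pyRange_one).mp hi
    simp only [pvP, Bool.and_eq_true, decide_eq_true_eq] at hp
    obtain ⟨hok, hin⟩ := hp
    set x := (cs2.drop i.toNat).take L.toNat with hxdef
    have hx2 : x ∈ pvBCollectL L cs2 (PySem.List.pyRange 0 t2 1) PySem.Set.empty := by
      have := pvBCollect_mem L cs2 (PySem.List.pyRange 0 t2 1) PySem.Set.empty
        ((PySem.List.pairwise_lt_pyRange_one 0 t2).imp le_of_lt) i hi hok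
      rwa [pvSlice_eq cs2 L i hi0 (by omega)] at this
    have hxlen : x.length = L.toNat := by
      rw [hxdef, pvSlice_len]; omega
    obtain ⟨pre, suf, heq⟩ := (PySem.Chars.isIn_iff_infix x cs1).mp hin
    have hx1 : x ∈ PySem.Set.ofList ((PySem.List.pyRange 0 ((cs1.length : Int) - L + 1) 1).map
        (fun i => PySem.List.slice cs1 (some i) (some (i + L)))) := by
      rw [pvMemSubs1 cs1 L (by omega) x]
      refine ⟨pre.length, ?_, ?_⟩
      · have : cs1.length = pre.length + x.length + suf.length := by
          rw [← heq]; simp; ring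
        omega
      · have hdrop : cs1.drop pre.length = x ++ suf := by
          rw [← heq, List.append_assoc, List.drop_left]
        rw [hdrop, List.take_left' hxlen]
    have hmem : x ∈ PySem.Set.inter (pvBCollectL L cs2 (PySem.List.pyRange 0 t2 1) PySem.Set.empty)
        (PySem.Set.ofList ((PySem.List.pyRange 0 ((cs1.length : Int) - L + 1) 1).map
          (fun i => PySem.List.slice cs1 (some i) (some (i + L))))) :=
      (PySem.Set.mem_inter _ _ _).mpr ⟨hx2, hx1⟩
    have hne := List.ne_nil_of_mem hmem
    simp only [PySem.Set.empty] at hne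
    simp [hne]
  | false =>
    have hnil : PySem.Set.inter (pvBCollectL L cs2 (PySem.List.pyRange 0 t2 1) PySem.Set.empty)
        (PySem.Set.ofList ((PySem.List.pyRange 0 ((cs1.length : Int) - L + 1) 1).map
          (fun i => PySem.List.slice cs1 (some i) (some (i + L))))) = [] := by
      rw [List.eq_nil_iff_forall_not_mem]
      intro x hx
      obtain ⟨hx2, hx1⟩ := (PySem.Set.mem_inter _ _ _).mp hx
      obtain ⟨j, hj, hxj⟩ := (pvMemSubs1 cs1 L (by omega) x).mp hx1
      have hxlen : x.length = L.toNat := by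
        rw [hxj, pvSlice_len]; omega
      rcases pvBCollect_src L cs2 _ _ x hx2 with h | ⟨i, hi, he⟩
      · simp [PySem.Set.empty] at h
      · obtain ⟨hi0, hilt⟩ := (PySem.List.mem_pyRange_one).mp hi
        rw [pvSlice_eq cs2 L i hi0 (by omega)] at he
        have hok : i + L ≤ (cs2.length : Int) := by
          have := hxlen
          rw [he, pvSlice_len] at this
          omega
        have hin : PySem.Chars.isIn ((cs2.drop i.toNat).take L.toNat) cs1 = true := by
          rw [← he, hxj]
          refine (PySem.Chars.isIn_iff_infix _ _).mpr ?_
          exact (List.take_prefix _ _).isInfix.trans (List.drop_suffix _ _).isInfix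
        have := List.any_eq_false.mp hany i hi
        rw [pvP] at this
        simp [hok, hin] at this
    simp only [PySem.Set.empty] at hnil
    simp [hnil]

-- the two ports agree on every input
theorem pvMain (L : Int) (s1 s2 : String) (t2 : Int) :
    tem_substring_com_o_tamanho L s1 s2 t2 = tem_substring_com_o_tamanho_alt L s1 s2 t2 := by
  unfold tem_substring_com_o_tamanho tem_substring_com_o_tamanho_alt
  rw [pvAOuter_bridge L s1.toList s2.toList t2 (t2 - 0).toNat 0 rfl,
    pvBCollect_bridge L s2.toList t2 (t2 - 0).toNat 0 rfl]
  by_cases hneg : L < 0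
  · rw [if_pos hneg, pvAOuter_neg L hneg]
  · rw [if_neg hneg]
    by_cases hz : L = 0
    · subst hz
      by_cases ht : t2 ≤ 0
      · rw [PySem.List.pyRange_one_eq_nil ht]
        simp [pvAOuterL, pvBCollectL, PySem.Set.inter, PySem.Set.empty]
      · rw [PySem.List.pyRange_one_cons (by omega : (0:Int) < t2)]
        simp only [zero_add]
        have hA : pvAOuterL 0 s1.toList s2.toList (0 :: PySem.List.pyRange 1 t2 1) = true := by
          simp [pvAOuterL, PySem.List.pyRange_one_eq_nil (le_refl (0:Int)), pvAInnerL,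
            PySem.Chars.isIn_nil]
        rw [hA]
        have hsl : PySem.List.slice s2.toList (some 0) (some (0 + 0)) = ([] : List Char) := by
          rw [pvSlice_eq _ 0 0 le_rfl le_rfl]; simp
        have h2 : ([] : List Char) ∈
            pvBCollectL 0 s2.toList (0 :: PySem.List.pyRange 1 t2 1) PySem.Set.empty := by
          simp only [pvBCollectL, hsl]
          rw [if_neg (by push_cast; omega)]
          exact pvBCollect_mono _ _ _ _ _ ((PySem.Set.mem_add _ _ _).mpr (Or.inr rfl))
        have h1 : ([] : List Char) ∈ PySem.Set.ofList
            ((PySem.List.pyRange 0 ((s1.toList.length : Int) - 0 + 1) 1).map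
              (fun i => PySem.List.slice s1.toList (some i) (some (i + 0)))) :=
          (pvMemSubs1 s1.toList 0 le_rfl []).mpr ⟨0, by simp, by simp⟩
        have hmem := (PySem.Set.mem_inter _ _ _).mpr ⟨h2, h1⟩
        exact (pvBangIsEmpty _ _ hmem).symm
    · have hL1 : 1 ≤ L := by omega
      rw [pvAOuter_char L hL1 s1.toList s2.toList _
        (fun i hi => ((PySem.List.mem_pyRange_one).mp hi).1)
        ((PySem.List.pairwise_lt_pyRange_one 0 t2).imp le_of_lt)]
      exact pvB_core L hL1 s1.toList s2.toList t2

-- ===== VERDICT (by name: the statement is the Claim_ definition above) =====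
theorem tem_substring_com_o_tamanho_spec : Claim_equal_tem_substring_com_o_tamanho := by
  intro tamanho_pesquisa s1 s2 t2 _
  unfold Spec_tem_substring_com_o_tamanho
  exact pvMain tamanho_pesquisa s1 s2 t2
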